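-- pv_equiv track=rewrite | github.com/TomokiC/libs | tree.py | dfs
-- ===== SOURCE A (Python) =====
-- G = [[], [2, 4], [3, 5], [], [6], [], []]
--
-- def dfs(v, visited, ret, node):
--     visited[v] = True
--     # vに直前の点から向かう辺の長さを記録
--     ret.append(v)
--     for nex in G[v]:
--         node.append(v)
--         if not visited[nex]:
--             dfs(nex, visited, ret, node)
--     # vから親に向かう辺の長さを記録
--     ret.append(-1 * v)
--     node.append(v)
--
--     return ret, node
-- ===== SOURCE B (Python) =====
-- G = [[], [2, 4], [3, 5], [], [6], [], []]
--
-- def dfs(v, visited, ret, node):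
--     # iterative DFS with an explicit stack of (vertex, next-neighbor-index) frames
--     visited[v] = True
--     ret.append(v)
--     stack = [(v, 0)]
--     while stack:
--         u, i = stack[-1]
--         gu = G[u]
--         if i < len(gu):
--             stack[-1] = (u, i + 1)
--             nex = gu[i]
--             node.append(u)
--             if not visited[nex]:
--                 visited[nex] = True
--                 ret.append(nex)
--                 stack.append((nex, 0))
--         else:
--             ret.append(-1 * u)
--             node.append(u)
--             stack.pop()
--     return ret, node
-- ===== Notes on version B (the rewrite author's own statement) =====
-- stated objective: alternative
-- what changed: Replaces the recursive DFS by an iterative loop over an explicit stack of (vertex, next-neighbor-index) frames that reproduces the same enter/edge/exit append order.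
import Mathlib
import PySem

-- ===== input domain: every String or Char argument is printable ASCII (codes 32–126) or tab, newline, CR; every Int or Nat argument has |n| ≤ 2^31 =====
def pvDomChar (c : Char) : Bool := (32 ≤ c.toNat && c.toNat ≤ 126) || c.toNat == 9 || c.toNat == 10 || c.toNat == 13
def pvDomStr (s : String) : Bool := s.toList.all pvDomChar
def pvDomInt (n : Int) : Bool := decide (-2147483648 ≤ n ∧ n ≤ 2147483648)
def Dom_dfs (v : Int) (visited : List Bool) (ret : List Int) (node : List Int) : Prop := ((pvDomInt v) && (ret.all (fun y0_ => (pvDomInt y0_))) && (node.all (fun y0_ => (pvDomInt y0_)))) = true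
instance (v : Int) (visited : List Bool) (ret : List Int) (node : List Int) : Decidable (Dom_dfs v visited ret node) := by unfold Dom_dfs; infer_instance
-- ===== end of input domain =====

-- B replaces the recursion by an explicit stack of (vertex, next-neighbor-index) frames (alternative
-- decomposition, same cost). Both Pythons mutate visited/ret/node in place and identically; the
-- equivalence proved here is about the returned (ret, node) value.

-- the module-level constant G
def pvG : List (List Int) := [[], [2, 4], [3, 5], [], [6], [], []]

-- G[v] with Python index semantics (default [] only outside Pre_, where Python raises)
def pvRow (v : Int) : List Int := PySem.List.pyGetD pvG v []

-- termination helpers (cited by both ports' decreasing_by): a hand-computed DFS-subtree weight of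
-- each vertex of the fixed acyclic graph, and the summed weight of a neighbor list / frame stack
def pvW (v : Int) : Nat :=
  if v = 1 ∨ v = -6 then 11
  else if v = 2 ∨ v = -5 then 5
  else if v = 4 ∨ v = -3 then 3
  else 1

def pvML (l : List Int) : Nat := (l.map (fun x => 1 + pvW x)).sum

theorem pvML_cons (x : Int) (l : List Int) : pvML (x :: l) = 1 + pvW x + pvML l := by
  simp [pvML]

theorem pvRow_empty (v : Int) (h : ¬ (-7 ≤ v ∧ v < 7)) : pvRow v = [] := by
  have hn : PySem.List.pyGet? pvG v = none := by
    rw [PySem.List.pyGet?_eq_none_iff]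
    simp [PySem.Raise.InRange, pvG]
    omega
  simp [pvRow, PySem.List.pyGetD, hn]

theorem pvW_row (u : Int) : pvW u = 1 + pvML (pvRow u) := by
  by_cases h : -7 ≤ u ∧ u < 7
  · obtain ⟨h1, h2⟩ := h
    interval_cases u <;> decide
  · have hrow : pvRow u = [] := pvRow_empty u h
    have hw : pvW u = 1 := by unfold pvW; split_ifs <;> omega
    simp [hrow, pvML, hw]

-- ===== PORT A =====
mutual
-- literal port of A's recursive dfs; visited is threaded as explicit state
def dfsA (v : Int) (vis : List Bool) (ret : List Int) (node : List Int) :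
    List Bool × List Int × List Int :=
  let vis1 := PySem.List.pySetD vis v true          -- visited[v] = True
  let ret1 := ret ++ [v]                            -- ret.append(v)
  let r := dfsFor v (pvRow v) vis1 ret1 node        -- for nex in G[v]: …
  (r.1, r.2.1 ++ [-1 * v], r.2.2 ++ [v])            -- ret.append(-1*v); node.append(v)
termination_by pvW v
decreasing_by
  rw [pvW_row v]
  omega

-- the body of the 'for nex in G[v]' loop, over the remaining neighbors
def dfsFor (v : Int) (rest : List Int) (vis : List Bool) (ret : List Int) (node : List Int) :
    List Bool × List Int × List Int :=
  match rest with
  | [] => (vis, ret, node)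
  | nex :: rs =>
    let node1 := node ++ [v]                        -- node.append(v)
    let st :=
      if PySem.List.pyGetD vis nex false then (vis, ret, node1)
      else dfsA nex vis ret node1                   -- if not visited[nex]: dfs(nex, …)
    dfsFor v rs st.1 st.2.1 st.2.2
termination_by pvML rest
decreasing_by
  · rw [pvML_cons]
    omega
  · rw [pvML_cons]
    omega
end

def dfs (v : Int) (visited : List Bool) (ret : List Int) (node : List Int) : List Int × List Int :=
  let r := dfsA v visited ret node
  (r.2.1, r.2.2)

-- ===== PORT B =====

-- summed weight of a frame stack, for termination of the while loop
def pvMS (S : List (Int × Nat)) : Nat :=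
  (S.map (fun p => 1 + pvML ((pvRow p.1).drop p.2))).sum

theorem pvMS_cons (u : Int) (i : Nat) (S : List (Int × Nat)) :
    pvMS ((u, i) :: S) = 1 + pvML ((pvRow u).drop i) + pvMS S := by
  simp [pvMS]

-- the while loop over the explicit stack; returns the final (visited, ret, node) state
def loopB (S : List (Int × Nat)) (vis : List Bool) (ret : List Int) (node : List Int) :
    List Bool × List Int × List Int :=
  match S with
  | [] => (vis, ret, node)
  | (u, i) :: S' =>
    let gu := pvRow u
    if hlt : i < gu.length then
      let nex := gu[i]
      let node1 := node ++ [u]                      -- node.append(u)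
      if PySem.List.pyGetD vis nex false then
        loopB ((u, i + 1) :: S') vis ret node1
      else                                          -- mark, record, push
        loopB ((nex, 0) :: (u, i + 1) :: S') (PySem.List.pySetD vis nex true) (ret ++ [nex]) node1
    else                                            -- neighbors exhausted: postorder append, pop
      loopB S' vis (ret ++ [-1 * u]) (node ++ [u])
termination_by pvMS S
decreasing_by
· have hdrop : (pvRow u).drop i = (pvRow u)[i] :: (pvRow u).drop (i + 1) :=
    List.drop_eq_getElem_cons hlt
  rw [pvMS_cons, pvMS_cons, hdrop, pvML_cons]
  omega
· have hdrop : (pvRow u).drop i = (pvRow u)[i] :: (pvRow u).drop (i + 1) :=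
    List.drop_eq_getElem_cons hlt
  have hw := pvW_row ((pvRow u)[i])
  rw [pvMS_cons, pvMS_cons, pvMS_cons, List.drop_zero, hdrop, pvML_cons]
  omega
· rw [pvMS_cons]
  omega

def dfs_alt (v : Int) (visited : List Bool) (ret : List Int) (node : List Int) : List Int × List Int :=
  let vis1 := PySem.List.pySetD visited v true      -- visited[v] = True
  let r := loopB [(v, 0)] vis1 (ret ++ [v]) node    -- ret.append(v); stack = [(v, 0)]
  (r.2.1, r.2.2)

-- ===== PRECONDITION & SPEC =====
-- Pre_ is exactly where Python A returns (otherwise it raises IndexError): v must index both G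
-- (7 rows) and visited, and visited must be long enough for every visited[nex] read the traversal
-- from v performs (spelled out per wrapped start vertex; G is a fixed constant, so the set of
-- reads is a fixed conjunction of bounds and of the two flags that can skip a subtree)
def Pre_dfs (v : Int) (visited : List Bool) (ret : List Int) (node : List Int) : Prop :=
  -7 ≤ v ∧ v < 7 ∧ -(visited.length : Int) ≤ v ∧ v < (visited.length : Int) ∧
  (if (if v < 0 then v + 7 else v) = 1 then
    5 ≤ visited.length ∧
    ((PySem.List.pySetD visited v true).getD 2 false = true ∨ 6 ≤ visited.length) ∧
    ((PySem.List.pySetD visited v true).getD 4 false = true ∨ 7 ≤ visited.length)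
   else if (if v < 0 then v + 7 else v) = 2 then 6 ≤ visited.length
   else if (if v < 0 then v + 7 else v) = 4 then 7 ≤ visited.length
   else True)
instance (v : Int) (visited : List Bool) (ret : List Int) (node : List Int) : Decidable (Pre_dfs v visited ret node) := by unfold Pre_dfs; infer_instance

def pvWitness_dfs : Int × List Bool × List Int × List Int :=
  (1, [false, false, false, false, false, false, false], [], [])

def Spec_dfs (v : Int) (visited : List Bool) (ret : List Int) (node : List Int) (out : List Int × List Int) : Prop := out = dfs_alt v visited ret node
instance (v : Int) (visited : List Bool) (ret : List Int) (node : List Int) (out : List Int × List Int) : Decidable (Spec_dfs v visited ret node out) := by unfold Spec_dfs; infer_instance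

-- ===== CLAIM (what is proved, stated in full; the proofs are below) =====
def Claim_equal_dfs : Prop := ∀ (v : Int) (visited : List Bool) (ret : List Int) (node : List Int), Dom_dfs v visited ret node → Pre_dfs v visited ret node → Spec_dfs v visited ret node (dfs v visited ret node)

-- ===== LEMMAS AND PROOFS =====

theorem pvRow_mem (v : Int) : ∀ x ∈ pvRow v, v < x ∧ x < 7 := by
  intro x hx
  by_cases h : -7 ≤ v ∧ v < 7
  · obtain ⟨h1, h2⟩ := h
    have rows : pvRow (-7) = [] ∧ pvRow (-6) = [2, 4] ∧ pvRow (-5) = [3, 5] ∧ pvRow (-4) = [] ∧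
        pvRow (-3) = [6] ∧ pvRow (-2) = [] ∧ pvRow (-1) = [] ∧ pvRow 0 = [] ∧ pvRow 1 = [2, 4] ∧
        pvRow 2 = [3, 5] ∧ pvRow 3 = [] ∧ pvRow 4 = [6] ∧ pvRow 5 = [] ∧ pvRow 6 = [] := by decide
    obtain ⟨r1, r2, r3, r4, r5, r6, r7, r8, r9, r10, r11, r12, r13, r14⟩ := rows
    interval_cases v <;> simp_all <;> omega
  · rw [pvRow_empty v h] at hx
    simp at hx

-- simulation: running the stack loop with top frame (v, i) first performs A's remaining
-- for-loop body over drop i (pvRow v), then the postorder appends, then continues with S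
theorem loopB_sim : ∀ (n : Nat) (v : Int), (7 - v).toNat < n →
    ∀ (i : Nat) (rest : List Int), (pvRow v).drop i = rest →
    ∀ (S : List (Int × Nat)) (vis : List Bool) (ret node : List Int),
    loopB ((v, i) :: S) vis ret node =
      (let st := dfsFor v rest vis ret node
       loopB S st.1 (st.2.1 ++ [-1 * v]) (st.2.2 ++ [v])) := by
  intro n
  induction n with
  | zero => omega
  | succ n ih =>
    intro v hv i rest
    induction rest generalizing i with
    | nil =>
      intro heq S vis ret node
      have hge : ¬ i < (pvRow v).length := by
        intro hlt
        have := List.drop_eq_getElem_cons hlt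
        rw [heq] at this
        simp at this
        omega
      rw [loopB, dfsFor]
      simp [hge]
    | cons nex rs ihr =>
      intro heq S vis ret node
      have hlt : i < (pvRow v).length := by
        by_contra hge
        rw [List.drop_eq_nil_of_le (by omega)] at heq
        simp at heq
      have hcons := List.drop_eq_getElem_cons hlt
      rw [heq] at hcons
      have hnex : (pvRow v)[i] = nex := by
        injection hcons with h1 h2
        exact h1.symm
      have hrs : (pvRow v).drop (i + 1) = rs := by
        injection hcons with h1 h2
        exact h2.symm
      rw [loopB]
      simp only [hlt, dif_pos, hnex]
      by_cases hvisd : PySem.List.pyGetD vis nex false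
      · rw [if_pos hvisd, ihr (i + 1) hrs S vis ret (node ++ [v])]
        conv => rhs; rw [dfsFor]
        simp [hvisd]
      · rw [if_neg hvisd]
        have hmemd : nex ∈ (pvRow v).drop i := by
          rw [heq]
          exact List.mem_cons_self ..
        have hmem : v < nex ∧ nex < 7 := pvRow_mem v nex (List.mem_of_mem_drop hmemd)
        -- inner: process the pushed child frame = run dfsA nex
        rw [ih nex (by omega) 0 (pvRow nex) (by simp) ((v, i + 1) :: S)]
        rw [ihr (i + 1) hrs S _ _ _]
        conv => rhs; rw [dfsFor]
        simp only [hvisd, if_neg, Bool.false_eq_true, not_false_eq_true]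
        rw [dfsA]

-- ===== VERDICT (by name: the statement is the Claim_ definition above) =====
theorem dfs_spec : Claim_equal_dfs := by
  intro v visited ret node _ _
  unfold Spec_dfs
  dsimp only [dfs, dfs_alt]
  rw [loopB_sim ((7 - v).toNat + 1) v (by omega) 0 (pvRow v) (by simp) [] _ _ _]
  rw [dfsA]
  simp [loopB]
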